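-- pv_equiv track=rewrite | github.com/argputra/filemask | filemask.py | group_type2_rules
-- ===== SOURCE A (Python) =====
-- def parse_char_ranges(range_string: str) -> list[dict]:
--     """
--     Mengubah string rentang (cth: "1-9, 31-40") menjadi list indeks 0-based.
--     """
--     ranges = []
--     if not range_string:
--         return ranges
--
--     parts = [p.strip() for p in range_string.split(',') if p.strip()]
--
--     for part in parts:
--         if '-' in part:
--             try:
--                 start_char, end_char = map(int, part.split('-'))
--             except ValueError:
--                 continue
--         else:
--             try:
--                 start_char = end_char = int(part)
--             except ValueError:
--                 continue
--
--         # Pastikan indeks valid (1-based dan start <= end)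
--         if start_char >= 1 and end_char >= start_char:
--             # Konversi ke indeks 0-based
--             ranges.append({'start': start_char - 1, 'end': end_char - 1})
--
--     return ranges
--
-- def group_type2_rules(rules: list[dict]) -> list[dict]:
--     """Kelompokkan aturan type2 dengan parameter struktural identik lalu gabungkan positionsString.
--     Kunci grouping: (anchorStart, anchorEnd, skipStart, skipEnd, linesPerRecord, caseSensitive, useRawRegexStart/useRawRegexEnd/useRawRegex)
--     Posisi per relative line digabung (union) per indeks.
--     """
--     groups = {}
--     for r in rules:
--         if r.get('type') != 'type2':
--             continue
--         key = (
--             r.get('anchorStart',''), r.get('anchorEnd',''),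
--             int(r.get('skipStart',0)), int(r.get('skipEnd',0)),
--             int(r.get('linesPerRecord',1)) or 1,
--             bool(r.get('caseSensitive', False)),
--             bool(r.get('useRawRegexStart', r.get('useRawRegex', False))),
--             bool(r.get('useRawRegexEnd', r.get('useRawRegex', False))),
--             bool(r.get('useRawRegex', False))
--         )
--         groups.setdefault(key, []).append(r)
--     aggregated = []
--     for key, rule_list in groups.items():
--         if not rule_list:
--             continue
--         # Ambil parameter dasar dari rule pertama
--         base = dict(rule_list[0])
--         # Gabungkan positionsString per relative line
--         lines_per_record = key[4]
--         # Kumpulkan list ranges per relative index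
--         per_index_ranges: list[list[dict]] = [[] for _ in range(lines_per_record)]
--         for rl in rule_list:
--             pos_string = rl.get('positionsString','')
--             raw_position_strings = [s.strip() for s in pos_string.split('&&')]
--             for idx in range(lines_per_record):
--                 src = raw_position_strings[idx] if idx < len(raw_position_strings) else ''
--                 ranges = parse_char_ranges(src)
--                 if ranges:
--                     per_index_ranges[idx].extend(ranges)
--         # Dedup merge overlapping ranges untuk tiap index
--         merged_parts = []
--         for idx_ranges in per_index_ranges:
--             if not idx_ranges:
--                 merged_parts.append('')
--                 continue
--             # Sort & merge
--             idx_ranges.sort(key=lambda x: (x['start'], x['end']))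
--             merged = []
--             cur = dict(idx_ranges[0])
--             for r in idx_ranges[1:]:
--                 if r['start'] <= cur['end'] + 1:  # overlap atau bersebelahan
--                     cur['end'] = max(cur['end'], r['end'])
--                 else:
--                     merged.append(cur)
--                     cur = dict(r)
--             merged.append(cur)
--             # Konversi kembali ke format positionsString segment (1-based)
--             seg = ', '.join(f"{m['start']+1}-{m['end']+1}" if m['start'] != m['end'] else f"{m['start']+1}" for m in merged)
--             merged_parts.append(seg)
--         base['positionsString'] = ' && '.join(merged_parts)
--         aggregated.append(base)
--     return aggregated
-- ===== SOURCE B (Python) =====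
-- def _key(r):
--     g = r.get
--     return (
--         g('anchorStart', ''), g('anchorEnd', ''),
--         int(g('skipStart', 0)), int(g('skipEnd', 0)),
--         int(g('linesPerRecord', 1)) or 1,
--         bool(g('caseSensitive', False)),
--         bool(g('useRawRegexStart', g('useRawRegex', False))),
--         bool(g('useRawRegexEnd', g('useRawRegex', False))),
--         bool(g('useRawRegex', False)),
--     )
--
--
-- def _positions(range_string):
--     """Set of 0-based character positions covered by a range string."""
--     pts = set()
--     for part in [p.strip() for p in range_string.split(',') if p.strip()]:
--         if '-' in part:
--             try:
--                 start, end = map(int, part.split('-'))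
--             except ValueError:
--                 continue
--         else:
--             try:
--                 start = end = int(part)
--             except ValueError:
--                 continue
--         if start >= 1 and end >= start:
--             pts.update(range(start - 1, end))
--     return pts
--
--
-- def _emit(pts):
--     """Format a sorted list of positions as maximal consecutive runs."""
--     out = []
--     for p in pts:
--         if out and p == out[-1][1] + 1:
--             out[-1] = (out[-1][0], p)
--         else:
--             out.append((p, p))
--     return ', '.join(f"{s + 1}" if s == e else f"{s + 1}-{e + 1}" for s, e in out)
--
--
-- def _merged_line(members, idx):
--     pts = set()
--     for m in members:
--         raw = [s.strip() for s in m.get('positionsString', '').split('&&')]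
--         pts |= _positions(raw[idx] if idx < len(raw) else '')
--     return _emit(sorted(pts))
--
--
-- def _aggregate(rules, key):
--     members = [r for r in rules if r.get('type') == 'type2' and _key(r) == key]
--     base = dict(members[0])
--     base['positionsString'] = ' && '.join(
--         _merged_line(members, idx) for idx in range(key[4]))
--     return base
--
--
-- def group_type2_rules(rules):
--     keys = []
--     for r in rules:
--         if r.get('type') == 'type2' and _key(r) not in keys:
--             keys.append(_key(r))
--     return [_aggregate(rules, k) for k in keys]
-- ===== Notes on version B (the rewrite author's own statement) =====
-- stated objective: alternative
-- what changed: B drops the grouping dict and the interval sort-and-merge entirely: it collects the distinct keys in first-occurrence order, re-scans the rule list per key to select members, and merges positions per line index by building the set of covered 0-based positions and emitting maximal runs of consecutive sorted positions, via list comprehensions instead of accumulator loops.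
import Mathlib
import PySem

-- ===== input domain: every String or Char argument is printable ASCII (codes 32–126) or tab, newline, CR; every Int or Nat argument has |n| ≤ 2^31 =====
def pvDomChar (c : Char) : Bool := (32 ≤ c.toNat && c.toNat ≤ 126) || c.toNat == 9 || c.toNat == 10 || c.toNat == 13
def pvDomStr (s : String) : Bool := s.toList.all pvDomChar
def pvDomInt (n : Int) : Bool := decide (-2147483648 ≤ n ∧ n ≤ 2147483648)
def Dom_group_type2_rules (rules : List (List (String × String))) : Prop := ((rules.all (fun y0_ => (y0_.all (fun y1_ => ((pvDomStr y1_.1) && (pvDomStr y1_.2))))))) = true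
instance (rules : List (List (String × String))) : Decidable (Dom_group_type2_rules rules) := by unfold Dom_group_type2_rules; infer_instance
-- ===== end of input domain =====

-- B replaces A's dict-grouping plus per-index interval sort-and-merge by: distinct keys in first-occurrence
-- order, a rescan of the rules per key, and per-index merging through the set of covered positions emitted
-- as maximal consecutive runs (objective: alternative). Key construction and range parsing are the
-- identical Python lines in both and are shared helpers here.

-- ===== PORT A =====
abbrev RuleKey := String × String × Int × Int × Int × Bool × Bool × Bool × Bool

def getStr (r : List (String × String)) (k d : String) : String :=
  (PySem.Dict.mk r).getD k d

def getBool (r : List (String × String)) (k : String) : Bool :=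
  match (PySem.Dict.mk r).get? k with
  | none => false
  | some v => v != ""          -- bool(<str>) = nonempty

def getBoolF (r : List (String × String)) (k : String) : Bool :=
  match (PySem.Dict.mk r).get? k with
  | none => getBool r "useRawRegex"
  | some v => v != ""

def getInt (r : List (String × String)) (k : String) (d : Int) : Int :=
  match (PySem.Dict.mk r).get? k with
  | none => d
  | some v => (PySem.Int.ofStr? v).getD 0    -- int(v); ofStr? = none is a ValueError, excluded by Pre_

def ruleKey (r : List (String × String)) : RuleKey :=
  (getStr r "anchorStart" "", getStr r "anchorEnd" "",
   getInt r "skipStart" 0, getInt r "skipEnd" 0,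
   (if getInt r "linesPerRecord" 1 = 0 then 1 else getInt r "linesPerRecord" 1),
   getBool r "caseSensitive",
   getBoolF r "useRawRegexStart", getBoolF r "useRawRegexEnd",
   getBool r "useRawRegex")

def isType2 (r : List (String × String)) : Bool :=
  (PySem.Dict.mk r).get? "type" == some "type2"

-- one comma part of a range string → optional (start, end); identical Python in Source A and Source B
def parsePart? (part : String) : Option (Int × Int) :=
  if PySem.Str.isIn "-" part then
    match ((PySem.Str.split? part "-").getD []).map PySem.Int.ofStr? with
    | [some a, some b] => some (a, b)     -- any other shape / parse failure: ValueError, caught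
    | _ => none
  else
    match PySem.Int.ofStr? part with
    | some a => some (a, a)
    | none => none

-- the stripped nonempty comma parts; identical Python in Source A and Source B
def partsOf (s : String) : List String :=
  (((PySem.Str.split? s ",").getD []).map PySem.Str.strip).filter (fun p => p != "")

-- [s.strip() for s in r.get('positionsString','').split('&&')] and its idx lookup (identical in both)
def rawOf (m : List (String × String)) : List String :=
  ((PySem.Str.split? (getStr m "positionsString" "") "&&").getD []).map PySem.Str.strip

def srcAt (m : List (String × String)) (idx : Nat) : String :=
  let raw := rawOf m
  if idx < raw.length then raw.getD idx "" else ""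

-- parse_char_ranges (A's list-of-intervals form)
def parseCharRanges (s : String) : List (Int × Int) :=
  if s == "" then []
  else
    (partsOf s).foldl
      (fun acc part =>
        match parsePart? part with
        | none => acc
        | some se => if 1 ≤ se.1 ∧ se.1 ≤ se.2 then acc ++ [(se.1 - 1, se.2 - 1)] else acc) []

def collectGroups (rules : List (List (String × String))) :
    PySem.Dict RuleKey (List (List (String × String))) :=
  rules.foldl
    (fun g r => if isType2 r then g.modify (ruleKey r) [] (· ++ [r]) else g)
    PySem.Dict.empty

def perIndexRanges (lpr : Int) (ruleList : List (List (String × String))) :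
    List (List (Int × Int)) :=
  ruleList.foldl
    (fun per rl =>
      (List.range lpr.toNat).foldl
        (fun per2 idx =>
          let rs := parseCharRanges (srcAt rl idx)
          if rs ≠ [] then per2.set idx (per2.getD idx [] ++ rs) else per2) per)
    ((List.range lpr.toNat).map (fun _ => []))

def fmtRange (m : Int × Int) : String :=
  if m.1 != m.2 then
    PySem.Str.join "" [PySem.Int.toStr (m.1 + 1), "-", PySem.Int.toStr (m.2 + 1)]
  else PySem.Int.toStr (m.1 + 1)

-- A's per-index merge: stable sort by (start, end), then adjacency/overlap scan
def mergeSeg (idxRanges : List (Int × Int)) : String :=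
  if idxRanges = [] then ""
  else
    match PySem.List.sorted2 idxRanges (fun x => x.1) (fun x => x.2) with
    | [] => ""
    | c :: rest =>
      let st := rest.foldl
        (fun (st : List (Int × Int) × (Int × Int)) r =>
          if r.1 ≤ st.2.2 + 1 then (st.1, (st.2.1, max st.2.2 r.2))
          else (st.1 ++ [st.2], r)) ([], c)
      PySem.Str.join ", " ((st.1 ++ [st.2]).map fmtRange)

def group_type2_rules (rules : List (List (String × String))) : List (List (String × String)) :=
  (collectGroups rules).items.foldl
    (fun agg kv =>
      if kv.2 = [] then agg
      else
        let base := PySem.Dict.mk (kv.2.headD [])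
        let lpr := kv.1.2.2.2.2.1
        let per := perIndexRanges lpr kv.2
        let mergedParts := per.foldl (fun ps l => ps ++ [mergeSeg l]) []
        agg ++ [(base.insert "positionsString" (PySem.Str.join " && " mergedParts)).items]) []

-- ===== PORT B =====
-- B's parser: the set of covered 0-based positions of a range string
def positionsSet (s : String) : PySem.Set Int :=
  (partsOf s).foldl
    (fun pts part =>
      match parsePart? part with
      | none => pts
      | some se =>
        if 1 ≤ se.1 ∧ se.1 ≤ se.2 then
          PySem.Set.update pts (PySem.List.pyRange (se.1 - 1) se.2 1)
        else pts)
    PySem.Set.empty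

def fmtRun (r : Int × Int) : String :=
  if r.1 = r.2 then PySem.Int.toStr (r.1 + 1)
  else PySem.Str.join "" [PySem.Int.toStr (r.1 + 1), "-", PySem.Int.toStr (r.2 + 1)]

-- walk the sorted positions, extending the last run or opening a new one
def emitRuns (pts : List Int) : String :=
  let runs := pts.foldl
    (fun (out : List (Int × Int)) p =>
      match out.getLast? with
      | some le => if p = le.2 + 1 then out.dropLast ++ [(le.1, p)] else out ++ [(p, p)]
      | none => [(p, p)])
    []
  PySem.Str.join ", " (runs.map fmtRun)

def mergedLine (members : List (List (String × String))) (idx : Nat) : String :=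
  let pts := members.foldl
    (fun pts m => PySem.Set.union pts (positionsSet (srcAt m idx)))
    PySem.Set.empty
  emitRuns (PySem.List.sorted pts (fun x => x))

def aggregate (rules : List (List (String × String))) (k : RuleKey) : List (String × String) :=
  let members := rules.filter (fun r => isType2 r && (ruleKey r == k))
  ((PySem.Dict.mk (members.headD [])).insert "positionsString"
    (PySem.Str.join " && "
      ((List.range k.2.2.2.2.1.toNat).map (fun idx => mergedLine members idx)))).items

def group_type2_rules_alt (rules : List (List (String × String))) : List (List (String × String)) :=
  (rules.foldl
      (fun ks r => if isType2 r ∧ ruleKey r ∉ ks then ks ++ [ruleKey r] else ks)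
      ([] : List RuleKey)).map
    (fun k => aggregate rules k)

-- ===== PRECONDITION & SPEC =====
def intKeyOk (r : List (String × String)) (k : String) : Bool :=
  match (PySem.Dict.mk r).get? k with
  | none => true
  | some v => (PySem.Int.ofStr? v).isSome

-- Pre_ excludes exactly the inputs where the Python raises ValueError: a rule whose
-- "type" is "type2" but whose "skipStart"/"skipEnd"/"linesPerRecord" value int() cannot
-- parse, such as "0x10", "1e3" or "x".
def Pre_group_type2_rules (rules : List (List (String × String))) : Prop :=
  ∀ r ∈ rules, (PySem.Dict.mk r).get? "type" = some "type2" →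
    (intKeyOk r "skipStart" ∧ intKeyOk r "skipEnd" ∧ intKeyOk r "linesPerRecord")

instance (rules : List (List (String × String))) : Decidable (Pre_group_type2_rules rules) := by
  unfold Pre_group_type2_rules; infer_instance

def pvWitness_group_type2_rules : (List (List (String × String))) :=
  [ [("type", "type2"), ("positionsString", "2-5, 4-9, 1"), ("skipStart", "3")],
    [("type", "type2"), ("positionsString", "6-7")] ]

def Spec_group_type2_rules (rules : List (List (String × String))) (out : List (List (String × String))) : Prop := out = group_type2_rules_alt rules
instance (rules : List (List (String × String))) (out : List (List (String × String))) : Decidable (Spec_group_type2_rules rules out) := by unfold Spec_group_type2_rules; infer_instance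

-- ===== CLAIM =====
def Claim_equal_group_type2_rules : Prop := ∀ (rules : List (List (String × String))), Dom_group_type2_rules rules → Pre_group_type2_rules rules → Spec_group_type2_rules rules (group_type2_rules rules)

-- ===== LEMMAS AND PROOFS =====

-- coverage of a list of closed intervals
def rcov (L : List (Int × Int)) (p : Int) : Prop := ∃ r ∈ L, r.1 ≤ p ∧ p ≤ r.2

def rgap (a b : Int × Int) : Prop := a.2 + 1 < b.1

theorem rcov_nil (p : Int) : ¬ rcov [] p := by simp [rcov]

theorem rcov_cons (x : Int × Int) (L : List (Int × Int)) (p : Int) :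
    rcov (x :: L) p ↔ (x.1 ≤ p ∧ p ≤ x.2) ∨ rcov L p := by simp [rcov]

theorem rcov_append (L M : List (Int × Int)) (p : Int) :
    rcov (L ++ M) p ↔ rcov L p ∨ rcov M p := by
  simp only [rcov, List.mem_append, or_and_right, exists_or]

theorem rcov_nil_iff (p : Int) : rcov [] p ↔ False := by simp [rcov]
theorem rcov_singleton (x : Int × Int) (p : Int) : rcov [x] p ↔ x.1 ≤ p ∧ p ≤ x.2 := by simp [rcov]

theorem rcov_flatMap {α : Type} (l : List α) (g : α → List (Int × Int)) (p : Int) :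
    rcov (l.flatMap g) p ↔ ∃ a ∈ l, rcov (g a) p := by
  simp only [rcov, List.mem_flatMap]
  tauto

-- a canonical decomposition (nonempty, gap-separated intervals) is determined by its coverage
theorem canon_unique (xs : List (Int × Int)) :
    ∀ ys : List (Int × Int),
    (∀ r ∈ xs, r.1 ≤ r.2) → xs.Pairwise rgap →
    (∀ r ∈ ys, r.1 ≤ r.2) → ys.Pairwise rgap →
    (∀ p, rcov xs p ↔ rcov ys p) → xs = ys := by
  induction xs with
  | nil =>
    intro ys _ _ hy1 _ h
    cases ys with
    | nil => rfl
    | cons y ys' =>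
      exfalso
      have : rcov (y :: ys') y.1 := ⟨y, List.mem_cons_self, le_refl _, hy1 y List.mem_cons_self⟩
      exact rcov_nil y.1 ((h y.1).mpr this)
  | cons x xs' ih =>
    intro ys hx1 hx2 hy1 hy2 h
    cases ys with
    | nil =>
      exfalso
      have : rcov (x :: xs') x.1 := ⟨x, List.mem_cons_self, le_refl _, hx1 x List.mem_cons_self⟩
      exact rcov_nil x.1 ((h x.1).mp this)
    | cons y ys' =>
      have hxle := hx1 x List.mem_cons_self
      have hyle := hy1 y List.mem_cons_self
      have hxgap := (List.pairwise_cons.mp hx2).1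
      have hygap := (List.pairwise_cons.mp hy2).1
      have h1 : x.1 = y.1 := by
        have hxy : y.1 ≤ x.1 := by
          obtain ⟨r, hr, hb1, hb2⟩ := (h x.1).mp ⟨x, List.mem_cons_self, le_refl _, hxle⟩
          rcases List.mem_cons.mp hr with rfl | hr'
          · exact hb1
          · have := hygap r hr'
            have := hy1 r (List.mem_cons_of_mem _ hr')
            simp [rgap] at *; omega
        have hyx : x.1 ≤ y.1 := by
          obtain ⟨r, hr, hb1, hb2⟩ := (h y.1).mpr ⟨y, List.mem_cons_self, le_refl _, hyle⟩
          rcases List.mem_cons.mp hr with rfl | hr'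
          · exact hb1
          · have := hxgap r hr'
            have := hx1 r (List.mem_cons_of_mem _ hr')
            simp [rgap] at *; omega
        omega
      have h2 : x.2 = y.2 := by
        by_contra hne
        rcases lt_or_gt_of_ne hne with hlt | hgt
        · have hc : rcov (y :: ys') (x.2 + 1) := ⟨y, List.mem_cons_self, by omega, by omega⟩
          obtain ⟨r, hr, hb1, hb2⟩ := (h (x.2+1)).mpr hc
          rcases List.mem_cons.mp hr with rfl | hr'
          · omega
          · have := hxgap r hr'; simp [rgap] at this; omega
        · have hc : rcov (x :: xs') (y.2 + 1) := ⟨x, List.mem_cons_self, by omega, by omega⟩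
          obtain ⟨r, hr, hb1, hb2⟩ := (h (y.2+1)).mp hc
          rcases List.mem_cons.mp hr with rfl | hr'
          · omega
          · have := hygap r hr'; simp [rgap] at this; omega
      have hxy : x = y := Prod.ext h1 h2
      subst hxy
      congr 1
      refine ih ys' (fun r hr => hx1 r (List.mem_cons_of_mem _ hr)) (List.pairwise_cons.mp hx2).2
        (fun r hr => hy1 r (List.mem_cons_of_mem _ hr)) (List.pairwise_cons.mp hy2).2 ?_
      intro p
      constructor
      · intro ⟨r, hr, hb1, hb2⟩
        have hpx : x.2 < p := by have := hxgap r hr; simp [rgap] at this; omega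
        obtain ⟨r', hr', hb1', hb2'⟩ := (h p).mp ⟨r, List.mem_cons_of_mem _ hr, hb1, hb2⟩
        rcases List.mem_cons.mp hr' with rfl | hr''
        · omega
        · exact ⟨r', hr'', hb1', hb2'⟩
      · intro ⟨r, hr, hb1, hb2⟩
        have hpx : x.2 < p := by have := hygap r hr; simp [rgap] at this; omega
        obtain ⟨r', hr', hb1', hb2'⟩ := (h p).mpr ⟨r, List.mem_cons_of_mem _ hr, hb1, hb2⟩
        rcases List.mem_cons.mp hr' with rfl | hr''
        · omega
        · exact ⟨r', hr'', hb1', hb2'⟩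

-- A's adjacency scan, recursively
def scanGo (merged : List (Int × Int)) (cur : Int × Int) :
    List (Int × Int) → List (Int × Int)
  | [] => merged ++ [cur]
  | r :: t =>
    if r.1 ≤ cur.2 + 1 then scanGo merged (cur.1, max cur.2 r.2) t
    else scanGo (merged ++ [cur]) r t

theorem foldl_scan_eq (rest : List (Int × Int)) :
    ∀ (merged : List (Int × Int)) (cur : Int × Int),
    ((rest.foldl
        (fun (st : List (Int × Int) × (Int × Int)) r =>
          if r.1 ≤ st.2.2 + 1 then (st.1, (st.2.1, max st.2.2 r.2))
          else (st.1 ++ [st.2], r)) (merged, cur)).1 ++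
      [(rest.foldl
        (fun (st : List (Int × Int) × (Int × Int)) r =>
          if r.1 ≤ st.2.2 + 1 then (st.1, (st.2.1, max st.2.2 r.2))
          else (st.1 ++ [st.2], r)) (merged, cur)).2]) = scanGo merged cur rest := by
  induction rest with
  | nil => intro merged cur; rfl
  | cons r t ih =>
    intro merged cur
    simp only [List.foldl_cons, scanGo]
    by_cases h : r.1 ≤ cur.2 + 1
    · simpa [h] using ih merged (cur.1, max cur.2 r.2)
    · simpa [h] using ih (merged ++ [cur]) r

theorem scanGo_spec (rest : List (Int × Int)) :
    ∀ (merged : List (Int × Int)) (cur : Int × Int),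
    (∀ r ∈ rest, r.1 ≤ r.2) → cur.1 ≤ cur.2 → (∀ r ∈ merged, r.1 ≤ r.2) →
    (∀ r ∈ rest, cur.1 ≤ r.1) → rest.Pairwise (fun a b => a.1 ≤ b.1) →
    (merged ++ [cur]).Pairwise rgap →
    (∀ r ∈ scanGo merged cur rest, r.1 ≤ r.2) ∧
    (scanGo merged cur rest).Pairwise rgap ∧
    (∀ p, rcov (scanGo merged cur rest) p ↔ rcov (merged ++ [cur]) p ∨ rcov rest p) := by
  induction rest with
  | nil =>
    intro merged cur _ hc hm _ _ hpw
    refine ⟨?_, hpw, ?_⟩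
    · intro r hr
      rcases List.mem_append.mp hr with h | h
      · exact hm r h
      · simp at h; subst h; exact hc
    · intro p; simp only [scanGo, rcov_nil_iff, or_false]
  | cons r t ih =>
    intro merged cur h1 hc hm h3 hpw4 hpw
    simp only [scanGo]
    by_cases hcase : r.1 ≤ cur.2 + 1
    · simp only [hcase, if_pos]
      have hr12 := h1 r List.mem_cons_self
      have hr1c := h3 r List.mem_cons_self
      have hpwgap' : (merged ++ [(cur.1, max cur.2 r.2)]).Pairwise rgap := by
        rw [List.pairwise_append] at hpw ⊢
        refine ⟨hpw.1, by simp, ?_⟩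
        intro a ha b hb
        simp at hb; subst hb
        have := hpw.2.2 a ha (cur) (by simp)
        simp [rgap] at *; omega
      obtain ⟨g1, g2, g3⟩ := ih merged (cur.1, max cur.2 r.2)
        (fun x hx => h1 x (List.mem_cons_of_mem _ hx))
        (by simp; omega) hm
        (fun x hx => le_trans hr1c ((List.pairwise_cons.mp hpw4).1 x hx))
        (List.pairwise_cons.mp hpw4).2 hpwgap'
      refine ⟨g1, g2, ?_⟩
      intro p
      rw [g3 p]
      simp only [rcov_append, rcov_cons]
      have key : (cur.1 ≤ p ∧ p ≤ max cur.2 r.2) ↔ ((cur.1 ≤ p ∧ p ≤ cur.2) ∨ (r.1 ≤ p ∧ p ≤ r.2)) := by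
        omega
      tauto
    · simp only [hcase, reduceIte]
      have hr12 := h1 r List.mem_cons_self
      have hpwgap' : ((merged ++ [cur]) ++ [r]).Pairwise rgap := by
        rw [List.pairwise_append]
        refine ⟨hpw, by simp, ?_⟩
        intro a ha b hb
        simp at hb; subst hb
        rcases List.mem_append.mp ha with h | h
        · have := (List.pairwise_append.mp hpw).2.2 a h cur (by simp)
          simp [rgap] at *; omega
        · simp at h; subst h; simp [rgap]; omega
      obtain ⟨g1, g2, g3⟩ := ih (merged ++ [cur]) r
        (fun x hx => h1 x (List.mem_cons_of_mem _ hx))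
        hr12
        (fun x hx => by
          rcases List.mem_append.mp hx with h | h
          · exact hm x h
          · simp at h; subst h; exact hc)
        (fun x hx => (List.pairwise_cons.mp hpw4).1 x hx)
        (List.pairwise_cons.mp hpw4).2 hpwgap'
      refine ⟨g1, g2, ?_⟩
      intro p
      rw [g3 p]
      simp only [rcov_append, rcov_cons]
      tauto

-- B's run walk, recursively
def runsGo (rs re : Int) : List Int → List (Int × Int)
  | [] => [(rs, re)]
  | p :: t => if p = re + 1 then runsGo rs p t else (rs, re) :: runsGo p p t

theorem emit_go (t : List Int) :
    ∀ (acc : List (Int × Int)) (rs re : Int),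
    t.foldl
      (fun (out : List (Int × Int)) p =>
        match out.getLast? with
        | some le => if p = le.2 + 1 then out.dropLast ++ [(le.1, p)] else out ++ [(p, p)]
        | none => [(p, p)]) (acc ++ [(rs, re)]) = acc ++ runsGo rs re t := by
  induction t with
  | nil => intro acc rs re; simp [runsGo]
  | cons p t ih =>
    intro acc rs re
    simp only [List.foldl_cons, List.getLast?_concat, List.dropLast_concat, runsGo]
    by_cases h : p = re + 1
    · simpa [h] using ih acc rs p
    · simp only [h, reduceIte]
      rw [ih (acc ++ [(rs, re)]) p p]
      simp

theorem emitRuns_eq (pts : List Int) :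
    emitRuns pts = PySem.Str.join ", "
      ((match pts with | [] => [] | p :: t => runsGo p p t).map fmtRun) := by
  cases pts with
  | nil => rfl
  | cons p t =>
    rw [emitRuns]
    have h1 := emit_go t [] p p
    simp only [List.nil_append] at h1
    simp only [List.foldl_cons, List.getLast?_nil]
    rw [h1]

theorem runsGo_spec (t : List Int) :
    ∀ (rs re : Int), rs ≤ re → (∀ q ∈ t, re < q) → t.Pairwise (· < ·) →
    (∀ r ∈ runsGo rs re t, r.1 ≤ r.2) ∧
    (∀ r ∈ runsGo rs re t, rs ≤ r.1) ∧
    (runsGo rs re t).Pairwise rgap ∧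
    (∀ p, rcov (runsGo rs re t) p ↔ (rs ≤ p ∧ p ≤ re) ∨ p ∈ t) := by
  induction t with
  | nil =>
    intro rs re h _ _
    refine ⟨by simp [runsGo]; omega, by simp [runsGo], by simp [runsGo], ?_⟩
    intro p; simp [runsGo, rcov_singleton]
  | cons q t ih =>
    intro rs re h hlt hpw
    simp only [runsGo]
    have hq := hlt q List.mem_cons_self
    by_cases hc : q = re + 1
    · simp only [hc, if_pos]
      obtain ⟨g1, g2, g3, g4⟩ := ih rs (re + 1) (by omega)
        (fun x hx => (List.pairwise_cons.mp hpw).1 x hx |>.trans_le' (by omega))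
        (List.pairwise_cons.mp hpw).2
      refine ⟨g1, g2, g3, ?_⟩
      intro p
      rw [g4 p]
      subst hc
      simp only [List.mem_cons]
      have key : (rs ≤ p ∧ p ≤ re + 1) ↔ ((rs ≤ p ∧ p ≤ re) ∨ p = re + 1) := by omega
      tauto
    · simp only [hc, reduceIte]
      have hq1 : re + 1 < q := by omega
      obtain ⟨g1, g2, g3, g4⟩ := ih q q (le_refl _)
        (fun x hx => (List.pairwise_cons.mp hpw).1 x hx)
        (List.pairwise_cons.mp hpw).2
      refine ⟨?_, ?_, ?_, ?_⟩
      · intro r hr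
        rcases List.mem_cons.mp hr with rfl | hr'
        · exact h
        · exact g1 r hr'
      · intro r hr
        rcases List.mem_cons.mp hr with rfl | hr'
        · exact le_refl _
        · exact le_trans (by omega) (g2 r hr')
      · rw [List.pairwise_cons]
        exact ⟨fun r hr => by have := g2 r hr; simp [rgap]; omega, g3⟩
      · intro p
        rw [rcov_cons, g4 p]
        simp only [List.mem_cons]
        have key : (q ≤ p ∧ p ≤ q) ↔ p = q := by omega
        tauto

-- ---- lexicographic order produced by A's sorted2 call ----

def lexLtB (a b : Int × Int) : Bool :=
  decide (a.1 < b.1) || !decide (b.1 < a.1) && decide (a.2 < b.2)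

theorem lexLtB_eq_false_iff (a b : Int × Int) :
    lexLtB a b = false ↔ (b.1 < a.1 ∨ (a.1 = b.1 ∧ b.2 ≤ a.2)) := by
  simp [lexLtB]; omega

theorem sorted2_eq_foldl (l : List (Int × Int)) :
    PySem.List.sorted2 l (fun x => x.1) (fun x => x.2) =
      l.foldl (fun acc x => PySem.List.insertBy lexLtB x acc) [] := rfl

theorem insertBy_pairwise_lex (x : Int × Int) (ys : List (Int × Int))
    (h : ys.Pairwise (fun a b => lexLtB b a = false)) :
    (PySem.List.insertBy lexLtB x ys).Pairwise (fun a b => lexLtB b a = false) := by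
  induction ys with
  | nil => simp [PySem.List.insertBy]
  | cons y ys ih =>
    rw [PySem.List.insertBy]
    by_cases hc : lexLtB x y = true
    · simp only [hc, reduceIte]
      rw [List.pairwise_cons]
      refine ⟨?_, h⟩
      intro z hz
      rcases List.mem_cons.mp hz with rfl | hz'
      · rw [lexLtB_eq_false_iff]; simp [lexLtB] at hc; omega
      · have h2 := (List.pairwise_cons.mp h).1 z hz'
        rw [lexLtB_eq_false_iff] at h2 ⊢
        simp [lexLtB] at hc
        omega
    · have hc' : lexLtB x y = false := by revert hc; cases lexLtB x y <;> simp
      rw [hc']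
      simp only [Bool.false_eq_true, if_false]
      rw [List.pairwise_cons]
      refine ⟨?_, ih (List.pairwise_cons.mp h).2⟩
      intro z hz
      rcases (PySem.List.mem_insertBy lexLtB x z ys).mp hz with rfl | hz'
      · exact hc'
      · exact (List.pairwise_cons.mp h).1 z hz'

theorem sorted2_pairwise_lex (l : List (Int × Int)) :
    (PySem.List.sorted2 l (fun x => x.1) (fun x => x.2)).Pairwise
      (fun a b => lexLtB b a = false) := by
  rw [sorted2_eq_foldl]
  have aux : ∀ (xs acc : List (Int × Int)),
      acc.Pairwise (fun a b => lexLtB b a = false) →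
      (xs.foldl (fun acc x => PySem.List.insertBy lexLtB x acc) acc).Pairwise
        (fun a b => lexLtB b a = false) := by
    intro xs
    induction xs with
    | nil => exact fun acc h => h
    | cons x xs ih => exact fun acc h => ih _ (insertBy_pairwise_lex x acc h)
  exact aux l [] (by simp)

-- ---- the two range parsers cover the same positions ----

theorem posParts (parts : List String) :
    ∀ (accL : List (Int × Int)) (accS : PySem.Set Int),
    accS.Nodup → (∀ y, y ∈ accS ↔ rcov accL y) →
    (parts.foldl
        (fun pts part =>
          match parsePart? part with
          | none => pts
          | some se =>
            if 1 ≤ se.1 ∧ se.1 ≤ se.2 then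
              PySem.Set.update pts (PySem.List.pyRange (se.1 - 1) se.2 1)
            else pts) accS).Nodup ∧
    (∀ y, y ∈ parts.foldl
        (fun pts part =>
          match parsePart? part with
          | none => pts
          | some se =>
            if 1 ≤ se.1 ∧ se.1 ≤ se.2 then
              PySem.Set.update pts (PySem.List.pyRange (se.1 - 1) se.2 1)
            else pts) accS ↔
      rcov (parts.foldl
        (fun acc part =>
          match parsePart? part with
          | none => acc
          | some se => if 1 ≤ se.1 ∧ se.1 ≤ se.2 then acc ++ [(se.1 - 1, se.2 - 1)] else acc) accL) y) := by
  induction parts with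
  | nil => intro accL accS hnd hmem; exact ⟨hnd, hmem⟩
  | cons part parts ih =>
    intro accL accS hnd hmem
    simp only [List.foldl_cons]
    cases hp : parsePart? part with
    | none =>
      exact ih accL accS hnd hmem
    | some se =>
      by_cases hcond : 1 ≤ se.1 ∧ se.1 ≤ se.2
      · simp only [hcond]
        refine ih (accL ++ [(se.1 - 1, se.2 - 1)])
          (PySem.Set.update accS (PySem.List.pyRange (se.1 - 1) se.2 1))
          (PySem.Set.nodup_update accS _ hnd) ?_
        intro y
        rw [PySem.Set.mem_update, rcov_append, rcov_singleton, hmem,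
          PySem.List.mem_pyRange_one]
        constructor
        · rintro (h | h)
          · exact Or.inl h
          · exact Or.inr (by omega)
        · rintro (h | h)
          · exact Or.inl h
          · exact Or.inr (by omega)
      · simp only [hcond, reduceIte]
        exact ih accL accS hnd hmem

theorem mem_positionsSet (s : String) (y : Int) :
    y ∈ positionsSet s ↔ rcov (parseCharRanges s) y := by
  rw [positionsSet, parseCharRanges]
  by_cases hs : (s == "") = true
  · have hs' : s = "" := by simpa using hs
    subst hs'
    have hparts : partsOf "" = [] := by decide
    simp [hparts, rcov]
  · simp only [hs, Bool.false_eq_true, if_false]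
    exact (posParts (partsOf s) [] PySem.Set.empty (by simp [PySem.Set.empty])
      (by intro y; simp [PySem.Set.empty, rcov])).2 y

-- ---- every parsed interval is nonempty ----

theorem foldl_pres {α β : Type} (P : β → Prop) (f : List β → α → List β)
    (hf : ∀ acc x, (∀ r ∈ acc, P r) → ∀ r ∈ f acc x, P r) :
    ∀ (xs : List α) (acc : List β), (∀ r ∈ acc, P r) → ∀ r ∈ xs.foldl f acc, P r := by
  intro xs
  induction xs with
  | nil => exact fun acc h => h
  | cons x xs ih => exact fun acc h => ih _ (hf acc x h)

theorem parseCharRanges_le (s : String) :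
    ∀ r ∈ parseCharRanges s, r.1 ≤ r.2 := by
  rw [parseCharRanges]
  by_cases hs : (s == "") = true
  · simp [hs]
  · simp only [hs, Bool.false_eq_true, if_false]
    refine foldl_pres _ _ ?_ _ [] (by simp)
    intro acc part hacc r hr
    cases hp : parsePart? part with
    | none =>
      simp only [hp] at hr
      exact hacc r hr
    | some se =>
      simp only [hp] at hr
      split at hr
      · rcases List.mem_append.mp hr with hx | hx
        · exact hacc r hx
        · simp only [List.mem_singleton] at hx
          subst hx
          omega
      · exact hacc r hr

-- ---- B's per-index set of positions ----

theorem lineFold_nodup (members : List (List (String × String))) (idx : Nat) :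
    ∀ accS : PySem.Set Int, accS.Nodup →
    (members.foldl (fun pts m => PySem.Set.union pts (positionsSet (srcAt m idx))) accS).Nodup := by
  induction members with
  | nil => exact fun accS h => h
  | cons m ms ih =>
    intro accS h
    rw [List.foldl_cons]
    exact ih _ (PySem.Set.nodup_union _ _ h)

theorem mem_lineFold (members : List (List (String × String))) (idx : Nat) :
    ∀ (accS : PySem.Set Int) (y : Int),
    y ∈ members.foldl (fun pts m => PySem.Set.union pts (positionsSet (srcAt m idx))) accS ↔
      y ∈ accS ∨ ∃ m ∈ members, y ∈ positionsSet (srcAt m idx) := by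
  induction members with
  | nil => intro accS y; simp
  | cons m ms ih =>
    intro accS y
    rw [List.foldl_cons, ih, PySem.Set.mem_union]
    simp only [List.mem_cons]
    constructor
    · rintro ((h | h) | ⟨m', hm', h⟩)
      · exact Or.inl h
      · exact Or.inr ⟨m, Or.inl rfl, h⟩
      · exact Or.inr ⟨m', Or.inr hm', h⟩
    · rintro (h | ⟨m', (rfl | hm'), h⟩)
      · exact Or.inl (Or.inl h)
      · exact Or.inl (Or.inr h)
      · exact Or.inr ⟨m', hm', h⟩

-- ---- A's perIndexRanges, characterised per index ----

def lineRanges (members : List (List (String × String))) (idx : Nat) : List (Int × Int) :=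
  members.flatMap (fun m => parseCharRanges (srcAt m idx))

theorem innerFold (rl : List (String × String)) (n m : Nat) :
    m ≤ n → ∀ per : List (List (Int × Int)), per.length = n →
    ((List.range m).foldl
        (fun per2 idx =>
          let rs := parseCharRanges (srcAt rl idx)
          if rs ≠ [] then per2.set idx (per2.getD idx [] ++ rs) else per2) per).length = n ∧
    ∀ i, i < n →
      ((List.range m).foldl
        (fun per2 idx =>
          let rs := parseCharRanges (srcAt rl idx)
          if rs ≠ [] then per2.set idx (per2.getD idx [] ++ rs) else per2) per).getD i [] =
        (if i < m then per.getD i [] ++ parseCharRanges (srcAt rl i) else per.getD i []) := by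
  induction m with
  | zero =>
    intro _ per hlen
    refine ⟨hlen, ?_⟩
    intro i hi
    simp
  | succ m ih =>
    intro hm per hlen
    obtain ⟨ihlen, ihget⟩ := ih (by omega) per hlen
    rw [List.range_succ, List.foldl_append, List.foldl_cons, List.foldl_nil]
    set resm := (List.range m).foldl
        (fun per2 idx =>
          let rs := parseCharRanges (srcAt rl idx)
          if rs ≠ [] then per2.set idx (per2.getD idx [] ++ rs) else per2) per with hresm
    have hgetm : resm.getD m [] = per.getD m [] := by
      rw [ihget m (by omega), if_neg (Nat.lt_irrefl m)]
    by_cases hrs : parseCharRanges (srcAt rl m) ≠ []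
    · rw [if_pos hrs]
      constructor
      · rw [List.length_set]; exact ihlen
      · intro i hi
        rw [List.getD_eq_getElem?_getD, List.getElem?_set]
        by_cases him : m = i
        · rw [if_pos him, ihlen]
          have hm' : m < n := him ▸ hi
          rw [if_pos hm', Option.getD_some, hgetm, him]
          rw [if_pos (Nat.lt_succ_self i)]
        · rw [if_neg him, ← List.getD_eq_getElem?_getD, ihget i hi]
          by_cases hilt : i < m
          · rw [if_pos hilt, if_pos (Nat.lt_succ_of_lt hilt)]
          · rw [if_neg hilt, if_neg (by omega)]
    · rw [if_neg hrs]
      refine ⟨ihlen, ?_⟩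
      intro i hi
      rw [ihget i hi]
      rw [ne_eq, not_not] at hrs
      by_cases him : i = m
      · subst him
        rw [if_neg (Nat.lt_irrefl i), if_pos (Nat.lt_succ_self i), hrs, List.append_nil]
      · by_cases hilt : i < m
        · rw [if_pos hilt, if_pos (Nat.lt_succ_of_lt hilt)]
        · rw [if_neg hilt, if_neg (by omega)]

theorem perFold (n : Nat) (members : List (List (String × String))) :
    ∀ (per : List (List (Int × Int))) (g : Nat → List (Int × Int)),
    per.length = n → (∀ i, i < n → per.getD i [] = g i) →
    (members.foldl
        (fun per rl =>
          (List.range n).foldl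
            (fun per2 idx =>
              let rs := parseCharRanges (srcAt rl idx)
              if rs ≠ [] then per2.set idx (per2.getD idx [] ++ rs) else per2) per) per).length = n ∧
    ∀ i, i < n →
      (members.foldl
        (fun per rl =>
          (List.range n).foldl
            (fun per2 idx =>
              let rs := parseCharRanges (srcAt rl idx)
              if rs ≠ [] then per2.set idx (per2.getD idx [] ++ rs) else per2) per) per).getD i [] =
        g i ++ lineRanges members i := by
  induction members with
  | nil =>
    intro per g hlen hg
    refine ⟨hlen, ?_⟩
    intro i hi
    simp only [List.foldl_nil, lineRanges, List.flatMap_nil, List.append_nil]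
    exact hg i hi
  | cons rl ms ih =>
    intro per g hlen hg
    rw [List.foldl_cons]
    obtain ⟨hlen', hget'⟩ := innerFold rl n n (le_refl n) per hlen
    have hg' : ∀ i, i < n →
        ((List.range n).foldl
          (fun per2 idx =>
            let rs := parseCharRanges (srcAt rl idx)
            if rs ≠ [] then per2.set idx (per2.getD idx [] ++ rs) else per2) per).getD i [] =
          g i ++ parseCharRanges (srcAt rl i) := by
      intro i hi
      rw [hget' i hi, if_pos hi, hg i hi]
    obtain ⟨h1, h2⟩ := ih _ (fun i => g i ++ parseCharRanges (srcAt rl i)) hlen' hg'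
    refine ⟨h1, ?_⟩
    intro i hi
    rw [h2 i hi]
    simp only [lineRanges, List.flatMap_cons, List.append_assoc]

theorem per_spec (lpr : Int) (members : List (List (String × String))) :
    (perIndexRanges lpr members).length = lpr.toNat ∧
    ∀ i, i < lpr.toNat → (perIndexRanges lpr members).getD i [] = lineRanges members i := by
  rw [perIndexRanges]
  have h := perFold lpr.toNat members ((List.range lpr.toNat).map (fun _ => []))
    (fun _ => []) (by simp) ?_
  · simpa using h
  · intro i hi
    rw [List.getD_eq_getElem?_getD, List.getElem?_map]
    simp [hi]

-- ---- the grouping dict, characterised as ordered keys + per-key filter ----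

theorem keys_fold_eq (rules : List (List (String × String))) :
    rules.foldl
        (fun ks r => if isType2 r ∧ ruleKey r ∉ ks then ks ++ [ruleKey r] else ks)
        ([] : List RuleKey) =
      PySem.Set.ofList ((rules.filter (fun r => isType2 r)).map ruleKey) := by
  rw [PySem.Set.ofList_eq_foldl, List.foldl_map, List.foldl_filter]
  have hfun : (fun (ks : List RuleKey) r => if isType2 r ∧ ruleKey r ∉ ks then ks ++ [ruleKey r] else ks) =
      (fun ks r => if isType2 r then PySem.Set.add ks (ruleKey r) else ks) := by
    funext ks r
    by_cases h1 : isType2 r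
    · rw [PySem.Set.add_eq_ite]
      by_cases h2 : ruleKey r ∈ ks
      · simp [h1, h2]
      · simp [h1, h2]
    · simp [h1]
  rw [hfun]

theorem groups_items (rules : List (List (String × String))) :
    (collectGroups rules).items =
      (rules.foldl
          (fun ks r => if isType2 r ∧ ruleKey r ∉ ks then ks ++ [ruleKey r] else ks)
          ([] : List RuleKey)).map
        (fun k => (k, rules.filter (fun r => isType2 r && (ruleKey r == k)))) := by
  have hcg : collectGroups rules =
      ((rules.filter (fun r => isType2 r)).map (fun r => (ruleKey r, r))).foldl
        (fun d p => d.modify p.1 [] (· ++ [p.2])) PySem.Dict.empty := by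
    rw [collectGroups, List.foldl_map, List.foldl_filter]
  have hkeys : (collectGroups rules).keys =
      PySem.Set.ofList ((rules.filter (fun r => isType2 r)).map ruleKey) := by
    rw [hcg, PySem.Dict.keys_foldl_modify_key]
    rw [PySem.Dict.keys_empty, PySem.Set.update_nil_left, List.map_map]
    rfl
  have hnd : (collectGroups rules).keys.Nodup := by
    rw [hkeys]
    exact PySem.Set.nodup_ofList _
  have hget : ∀ k, (collectGroups rules).getD k [] =
      rules.filter (fun r => isType2 r && (ruleKey r == k)) := by
    intro k
    rw [hcg, PySem.Dict.getD_foldl_modify_append, PySem.Dict.getD_empty, List.nil_append]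
    rw [List.filter_map, List.map_map]
    have h1 : ((rules.filter (fun r => isType2 r)).filter
        (fun r => ((fun p : RuleKey × List (String × String) => p.1 == k) ∘ (fun r => (ruleKey r, r))) r)).map
        ((fun p : RuleKey × List (String × String) => p.2) ∘ (fun r => (ruleKey r, r))) =
        (rules.filter (fun r => isType2 r)).filter (fun r => ruleKey r == k) := by
      rw [show ((fun p : RuleKey × List (String × String) => p.2) ∘ (fun r => (ruleKey r, r))) = id from rfl]
      rw [List.map_id]
      rfl
    rw [h1, List.filter_filter]
    apply List.filter_congr
    intro r _
    exact Bool.and_comm _ _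
  rw [keys_fold_eq, ← hkeys]
  rw [PySem.Dict.items_eq_map_keys _ hnd []]
  apply List.map_congr_left
  intro k _
  rw [hget k]

-- ---- A's per-index merge equals B's run emission, for matching coverage ----

theorem fmt_eq : ∀ m : Int × Int, fmtRange m = fmtRun m := by
  intro m
  by_cases h : m.1 = m.2
  · simp [fmtRange, fmtRun, h]
  · simp [fmtRange, fmtRun, h]

theorem merge_eq_emit (l : List (Int × Int)) (s : List Int)
    (hle : ∀ r ∈ l, r.1 ≤ r.2) (hnd : s.Nodup) (hmem : ∀ y, y ∈ s ↔ rcov l y) :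
    mergeSeg l = emitRuns (PySem.List.sorted s (fun x => x)) := by
  by_cases hl : l = []
  · subst hl
    have hs : s = [] := by
      apply List.eq_nil_iff_forall_not_mem.mpr
      intro y hy
      exact rcov_nil y ((hmem y).mp hy)
    subst hs
    rfl
  · have hperm := PySem.List.sorted2_perm l (fun x : Int × Int => x.1) (fun x => x.2) false
    have hpwlex := sorted2_pairwise_lex l
    cases hs2 : PySem.List.sorted2 l (fun x : Int × Int => x.1) (fun x => x.2) with
    | nil =>
      exfalso
      rw [hs2] at hperm
      exact hl (hperm.symm.eq_nil)
    | cons c rest =>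
      rw [hs2] at hperm hpwlex
      have hmem2 : ∀ x : Int × Int, x ∈ c :: rest ↔ x ∈ l := fun x => hperm.mem_iff
      have hA : mergeSeg l = PySem.Str.join ", " ((scanGo [] c rest).map fmtRange) := by
        rw [mergeSeg, if_neg hl, hs2]
        rw [← foldl_scan_eq rest [] c]
      obtain ⟨a1, a2, a3⟩ := scanGo_spec rest [] c
        (fun r hr => hle r ((hmem2 r).mp (List.mem_cons_of_mem _ hr)))
        (hle c ((hmem2 c).mp List.mem_cons_self))
        (by simp)
        (fun r hr => by
          have hx := (List.pairwise_cons.mp hpwlex).1 r hr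
          rw [lexLtB_eq_false_iff] at hx; omega)
        ((List.pairwise_cons.mp hpwlex).2.imp (fun {a b} hab => by
          rw [lexLtB_eq_false_iff] at hab; omega))
        (by simp [rgap])
      have hsperm := PySem.List.sorted_perm s (fun x : Int => x) false
      have hsle := PySem.List.sorted_pairwise s (fun x : Int => x)
      have hsnd := hsperm.nodup_iff.mpr hnd
      have hslt := (List.Pairwise.and hsle hsnd).imp
        (fun {a b} hab => lt_of_le_of_ne hab.1 hab.2)
      have hsmem : ∀ y, (y ∈ PySem.List.sorted s (fun x : Int => x)) ↔ rcov l y := by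
        intro y; rw [hsperm.mem_iff, hmem]
      cases hpts : PySem.List.sorted s (fun x : Int => x) with
      | nil =>
        exfalso
        have hcv : rcov l c.1 := ⟨c, (hmem2 c).mp List.mem_cons_self, le_refl _,
          hle c ((hmem2 c).mp List.mem_cons_self)⟩
        have hin := (hsmem c.1).mpr hcv
        rw [hpts] at hin
        exact List.not_mem_nil hin
      | cons p0 pt =>
        rw [hpts] at hslt hsmem
        have hB : emitRuns (p0 :: pt) = PySem.Str.join ", " ((runsGo p0 p0 pt).map fmtRun) := by
          rw [emitRuns_eq]
        obtain ⟨b1, b0, b2, b3⟩ := runsGo_spec pt p0 p0 (le_refl _)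
          (fun q hq => (List.pairwise_cons.mp hslt).1 q hq)
          (List.pairwise_cons.mp hslt).2
        have heq : scanGo [] c rest = runsGo p0 p0 pt := by
          refine canon_unique (scanGo [] c rest) (runsGo p0 p0 pt) a1 a2 b1 b2 ?_
          intro p
          rw [a3 p, b3 p]
          have hcv1 : rcov ([] ++ [c]) p ∨ rcov rest p ↔ rcov (c :: rest) p := by
            rw [List.nil_append, rcov_singleton, rcov_cons]
          have hcv2 : rcov (c :: rest) p ↔ rcov l p := by
            unfold rcov
            constructor
            · rintro ⟨r, hr, hb⟩; exact ⟨r, (hmem2 r).mp hr, hb⟩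
            · rintro ⟨r, hr, hb⟩; exact ⟨r, (hmem2 r).mpr hr, hb⟩
          have hmempts : ((p0 ≤ p ∧ p ≤ p0) ∨ p ∈ pt) ↔ p ∈ p0 :: pt := by
            simp only [List.mem_cons]; constructor
            · rintro (hx | hx); exact Or.inl (by omega); exact Or.inr hx
            · rintro (rfl | hx); exact Or.inl (by omega); exact Or.inr hx
          rw [hcv1, hcv2, hmempts, hsmem p]
        rw [hA, hB, heq]
        rw [List.map_congr_left (fun m _ => fmt_eq m)]

-- ---- per-key agreement ----

theorem mergedLine_eq (members : List (List (String × String))) (idx : Nat) :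
    mergeSeg (lineRanges members idx) = mergedLine members idx := by
  rw [mergedLine]
  apply merge_eq_emit
  · intro r hr
    rw [lineRanges, List.mem_flatMap] at hr
    obtain ⟨m, _, hr⟩ := hr
    exact parseCharRanges_le _ r hr
  · exact lineFold_nodup members idx PySem.Set.empty (by simp [PySem.Set.empty])
  · intro y
    rw [mem_lineFold]
    simp only [lineRanges]
    rw [rcov_flatMap]
    simp only [PySem.Set.empty, List.not_mem_nil, false_or]
    constructor
    · rintro ⟨m, hm, h⟩
      exact ⟨m, hm, (mem_positionsSet _ y).mp h⟩
    · rintro ⟨m, hm, h⟩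
      exact ⟨m, hm, (mem_positionsSet _ y).mpr h⟩

theorem keys_mem_members (rules : List (List (String × String))) (k : RuleKey)
    (hk : k ∈ rules.foldl
        (fun ks r => if isType2 r ∧ ruleKey r ∉ ks then ks ++ [ruleKey r] else ks)
        ([] : List RuleKey)) :
    rules.filter (fun r => isType2 r && (ruleKey r == k)) ≠ [] := by
  rw [keys_fold_eq] at hk
  rw [PySem.Set.mem_ofList, List.mem_map] at hk
  obtain ⟨r, hr, hkey⟩ := hk
  rw [List.mem_filter] at hr
  have : r ∈ rules.filter (fun r => isType2 r && (ruleKey r == k)) := by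
    rw [List.mem_filter]
    exact ⟨hr.1, by simp [hr.2, hkey]⟩
  exact List.ne_nil_of_mem this

theorem aggregate_eq (rules : List (List (String × String))) (k : RuleKey) :
    (let members := rules.filter (fun r => isType2 r && (ruleKey r == k))
     ((PySem.Dict.mk (members.headD [])).insert "positionsString"
       (PySem.Str.join " && "
         ((perIndexRanges k.2.2.2.2.1 members).foldl (fun ps l => ps ++ [mergeSeg l]) []))).items) =
      aggregate rules k := by
  rw [aggregate]
  refine congrArg (fun z =>
    ((PySem.Dict.mk ((rules.filter (fun r => isType2 r && (ruleKey r == k))).headD [])).insert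
      "positionsString" (PySem.Str.join " && " z)).items) ?_
  set members := rules.filter (fun r => isType2 r && (ruleKey r == k)) with hmembers
  rw [PySem.List.foldl_append_singleton_eq_map, List.nil_append]
  obtain ⟨hlen, hget⟩ := per_spec k.2.2.2.2.1 members
  apply List.ext_getElem
  · simp [hlen]
  · intro i h1 h2
    rw [List.getElem_map, List.getElem_map, List.getElem_range]
    have hi : i < k.2.2.2.2.1.toNat := by
      rw [List.length_map, hlen] at h1
      exact h1
    rw [show (perIndexRanges k.2.2.2.2.1 members)[i] =
        (perIndexRanges k.2.2.2.2.1 members).getD i [] from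
      (List.getD_eq_getElem _ _ _).symm]
    rw [hget i hi]
    exact mergedLine_eq members i

-- ===== VERDICT =====
theorem group_type2_rules_spec : Claim_equal_group_type2_rules := by
  intro rules _ _
  unfold Spec_group_type2_rules group_type2_rules group_type2_rules_alt
  rw [groups_items]
  set keys := rules.foldl
      (fun ks r => if isType2 r ∧ ruleKey r ∉ ks then ks ++ [ruleKey r] else ks)
      ([] : List RuleKey) with hkeys
  rw [show ((keys.map (fun k => (k, rules.filter (fun r => isType2 r && (ruleKey r == k))))).foldl
      (fun agg kv =>
        if kv.2 = [] then agg
        else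
          agg ++ [((PySem.Dict.mk (kv.2.headD [])).insert "positionsString"
            (PySem.Str.join " && "
              ((perIndexRanges kv.1.2.2.2.2.1 kv.2).foldl (fun ps l => ps ++ [mergeSeg l]) []))).items]) []) =
    ((keys.map (fun k => (k, rules.filter (fun r => isType2 r && (ruleKey r == k))))).foldl
      (fun agg kv =>
          agg ++ [((PySem.Dict.mk (kv.2.headD [])).insert "positionsString"
            (PySem.Str.join " && "
              ((perIndexRanges kv.1.2.2.2.2.1 kv.2).foldl (fun ps l => ps ++ [mergeSeg l]) []))).items]) []) from ?_]
  · rw [PySem.List.foldl_append_singleton_eq_map, List.nil_append, List.map_map]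
    apply List.map_congr_left
    intro k hk
    exact aggregate_eq rules k
  · apply PySem.List.foldl_congr_mem
    intro agg kv hkv
    rw [List.mem_map] at hkv
    obtain ⟨k, hk, rfl⟩ := hkv
    rw [if_neg (keys_mem_members rules k hk)]
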